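-- pv_equiv track=rewrite | github.com/jakeocinco/Static-Opcode-Occurence-Distributions-for-Malicious-Code-Recognition | scripts/base_functions.py | reduce_op_code_list_to_index_list
-- ===== SOURCE A (Python) =====
-- def _get_op_code_dictionary(op_codes):
--     return {x: [] for x in op_codes}
--
-- def reduce_op_code_list_to_index_list(
--         op_code_occurrence_list,
--         op_codes
-- ):
--     file_operations = _get_op_code_dictionary(op_codes=op_codes)
--
--     for line_index, line in enumerate(op_code_occurrence_list):
--         operation = line
--         if len(operation.split()) > 1:
--             operation = operation.split()[0]
--         if operation in file_operations:
--             file_operations[operation] += [line_index]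
--
--     return file_operations, len(op_code_occurrence_list)
-- ===== SOURCE B (Python) =====
-- def reduce_op_code_list_to_index_list(
--         op_code_occurrence_list,
--         op_codes
-- ):
--     # Parse every line into its operation once, then drive the construction by
--     # op_codes: for each requested opcode, scan the parsed operations and
--     # collect the indices where it occurs.
--     operations = [
--         l.split()[0] if len(l.split()) > 1 else l
--         for l in op_code_occurrence_list
--     ]
--     file_operations = {
--         x: [i for i, op in enumerate(operations) if op == x]
--         for x in op_codes
--     }
--     return file_operations, len(op_code_occurrence_list)
-- ===== Notes on version B (the rewrite author's own statement) =====
-- stated objective: alternative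
-- what changed: A makes one line-driven pass, appending each line index into a pre-built dict of empty buckets guarded by a membership test; B inverts the loop nesting: it parses all lines into operations once, then iterates over op_codes and for each opcode rescans the parsed operations collecting its matching indices (O(n*m) nested scan, no incremental dict mutation).
import Mathlib
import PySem

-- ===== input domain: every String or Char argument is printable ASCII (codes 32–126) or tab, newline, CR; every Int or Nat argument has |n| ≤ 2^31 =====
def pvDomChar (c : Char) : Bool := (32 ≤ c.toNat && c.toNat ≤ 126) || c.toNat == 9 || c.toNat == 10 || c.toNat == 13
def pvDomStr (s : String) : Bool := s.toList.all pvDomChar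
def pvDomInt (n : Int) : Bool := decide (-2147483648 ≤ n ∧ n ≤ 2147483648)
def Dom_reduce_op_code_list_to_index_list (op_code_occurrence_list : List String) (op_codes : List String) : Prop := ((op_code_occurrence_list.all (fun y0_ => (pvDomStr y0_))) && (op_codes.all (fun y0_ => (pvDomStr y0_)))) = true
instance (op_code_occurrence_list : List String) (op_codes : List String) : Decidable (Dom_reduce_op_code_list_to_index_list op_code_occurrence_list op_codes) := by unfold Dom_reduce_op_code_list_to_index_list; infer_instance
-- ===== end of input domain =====

-- B inverts the loop nesting: it parses all lines once, then for each opcode in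
-- op_codes rescans the parsed operations to collect its indices, instead of A's
-- single line-driven append pass into a pre-built empty dict; alternative algorithm.


-- ===== PORT A =====
def _get_op_code_dictionary (op_codes : List String) : PySem.Dict String (List Int) :=
  op_codes.foldl (fun d x => d.insert x []) PySem.Dict.empty

def reduce_op_code_list_to_index_list (op_code_occurrence_list : List String) (op_codes : List String) : (List (String × List Int)) × Int :=
  let file_operations := _get_op_code_dictionary op_codes
  let file_operations :=
    (PySem.List.enumerate op_code_occurrence_list).foldl
      (fun d p =>
        let operation := p.2
        let operation := if (PySem.Str.split₀ operation).length > 1 then (PySem.Str.split₀ operation).headD "" else operation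
        if d.contains operation then d.modify operation [] (fun v => v ++ [p.1]) else d)
      file_operations
  (file_operations.items, (op_code_occurrence_list.length : Int))

-- ===== PORT B =====
-- parse one line into its operation (Source B's per-line comprehension body)
def pvParseOp (l : String) : String :=
  if (PySem.Str.split₀ l).length > 1 then (PySem.Str.split₀ l).headD "" else l

def reduce_op_code_list_to_index_list_alt (op_code_occurrence_list : List String) (op_codes : List String) : (List (String × List Int)) × Int :=
  let operations := op_code_occurrence_list.map pvParseOp
  let file_operations :=
    op_codes.foldl
      (fun (d : PySem.Dict String (List Int)) x =>
        d.insert x (((PySem.List.enumerate operations).filter (fun p => p.2 == x)).map (·.1)))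
      PySem.Dict.empty
  (file_operations.items, (op_code_occurrence_list.length : Int))

-- ===== PRECONDITION & SPEC =====
def Spec_reduce_op_code_list_to_index_list (op_code_occurrence_list : List String) (op_codes : List String) (out : (List (String × List Int)) × Int) : Prop := out = reduce_op_code_list_to_index_list_alt op_code_occurrence_list op_codes
instance (op_code_occurrence_list : List String) (op_codes : List String) (out : (List (String × List Int)) × Int) : Decidable (Spec_reduce_op_code_list_to_index_list op_code_occurrence_list op_codes out) := by unfold Spec_reduce_op_code_list_to_index_list; infer_instance

-- ===== CLAIM (what is proved, stated in full; the proofs are below) =====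
def Claim_equal_reduce_op_code_list_to_index_list : Prop := ∀ (op_code_occurrence_list : List String) (op_codes : List String), Dom_reduce_op_code_list_to_index_list op_code_occurrence_list op_codes → Spec_reduce_op_code_list_to_index_list op_code_occurrence_list op_codes (reduce_op_code_list_to_index_list op_code_occurrence_list op_codes)

-- ===== LEMMAS AND PROOFS =====

-- B's dict-comprehension fold: value at k is f k when k occurs in the key list.
theorem getD_foldl_insert_fun (t : List String) (f : String → List Int)
    (d : PySem.Dict String (List Int)) (k : String) :
    (t.foldl (fun d x => d.insert x (f x)) d).getD k [] =
      if k ∈ t then f k else d.getD k [] := by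
  induction t generalizing d with
  | nil => simp
  | cons x t ih =>
    simp only [List.foldl_cons, ih, PySem.Dict.getD_insert, List.mem_cons]
    by_cases hk : k ∈ t <;> by_cases hx : k = x <;> simp [hk, hx]

-- A's line loop: keys are preserved.
theorem keys_lineLoop (l : List (Int × String)) (d : PySem.Dict String (List Int)) :
    (l.foldl (fun d p =>
        if d.contains (pvParseOp p.2) then d.modify (pvParseOp p.2) [] (fun v => v ++ [p.1]) else d)
      d).keys = d.keys := by
  induction l generalizing d with
  | nil => rfl
  | cons p t ih =>
    simp only [List.foldl_cons]
    by_cases h : d.contains (pvParseOp p.2) = true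
    · rw [if_pos h, ih, PySem.Dict.keys_modify, PySem.Dict.keys_insert_of_contains (h := h)]
    · rw [if_neg h, ih]

-- A's line loop: value at a contained key accumulates the matching indices in order.
theorem getD_lineLoop (l : List (Int × String)) (d : PySem.Dict String (List Int)) (k : String) :
    (l.foldl (fun d p =>
        if d.contains (pvParseOp p.2) then d.modify (pvParseOp p.2) [] (fun v => v ++ [p.1]) else d)
      d).getD k [] =
      d.getD k [] ++
        (if d.contains k then ((l.filter (fun p => pvParseOp p.2 == k)).map (·.1)) else []) := by
  induction l generalizing d with
  | nil => simp
  | cons p t ih =>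
    simp only [List.foldl_cons]
    by_cases h : d.contains (pvParseOp p.2) = true
    · rw [if_pos h, ih]
      have hc : ∀ k', (d.modify (pvParseOp p.2) [] (fun v => v ++ [p.1])).contains k' = d.contains k' := by
        intro k'
        rw [PySem.Dict.contains_modify]
        by_cases hk' : k' = pvParseOp p.2 <;> simp [hk', h]
      rw [hc, PySem.Dict.getD_modify]
      by_cases hk : k = pvParseOp p.2
      · subst hk
        rw [if_pos rfl, if_pos h, if_pos h, List.filter_cons,
            if_pos (by simp : ((pvParseOp p.2 == pvParseOp p.2) = true)),
            List.map_cons, List.append_assoc]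
        rfl
      · rw [if_neg hk, List.filter_cons,
            if_neg (by simp [Ne.symm hk] : ¬ ((pvParseOp p.2 == k) = true))]
    · rw [if_neg h, ih]
      by_cases hk : k = pvParseOp p.2
      · subst hk
        rw [if_neg h, if_neg h]
      · rw [List.filter_cons,
            if_neg (by simp [Ne.symm hk] : ¬ ((pvParseOp p.2 == k) = true))]

-- enumerate commutes with mapping over the elements.
theorem enumerate_map (g : String → String) (l : List String) (s : Int) :
    PySem.List.enumerate (l.map g) s = (PySem.List.enumerate l s).map (fun p => (p.1, g p.2)) := by
  induction l generalizing s with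
  | nil => simp [PySem.List.enumerate_nil]
  | cons x t ih => simp [PySem.List.enumerate_cons, ih]

theorem reduce_spec_aux (op_code_occurrence_list : List String) (op_codes : List String) :
    reduce_op_code_list_to_index_list op_code_occurrence_list op_codes =
      reduce_op_code_list_to_index_list_alt op_code_occurrence_list op_codes := by
  unfold reduce_op_code_list_to_index_list reduce_op_code_list_to_index_list_alt
      _get_op_code_dictionary
  have hfun : (fun (d : PySem.Dict String (List Int)) (p : Int × String) =>
      let operation := p.2
      let operation := if (PySem.Str.split₀ operation).length > 1 then (PySem.Str.split₀ operation).headD "" else operation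
      if d.contains operation then d.modify operation [] (fun v => v ++ [p.1]) else d) =
      (fun d p => if d.contains (pvParseOp p.2) then d.modify (pvParseOp p.2) [] (fun v => v ++ [p.1]) else d) := rfl
  simp only [hfun]
  set d0 := op_codes.foldl (fun (d : PySem.Dict String (List Int)) x => d.insert x []) PySem.Dict.empty with hd0
  set dA := (PySem.List.enumerate op_code_occurrence_list).foldl
      (fun d p => if d.contains (pvParseOp p.2) then d.modify (pvParseOp p.2) [] (fun v => v ++ [p.1]) else d) d0 with hdA
  set fB := fun x => ((PySem.List.enumerate (op_code_occurrence_list.map pvParseOp)).filter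
      (fun p => p.2 == x)).map (·.1) with hfB
  set dB := op_codes.foldl (fun (d : PySem.Dict String (List Int)) x => d.insert x (fB x))
      PySem.Dict.empty with hdB
  have hkeys0 : d0.keys = PySem.Set.update ([] : List String) op_codes := by
    rw [hd0, PySem.Dict.keys_foldl_insert (f := fun _ _ => ([] : List Int))]
    simp
  have hkeysB : dB.keys = PySem.Set.update ([] : List String) op_codes := by
    rw [hdB, PySem.Dict.keys_foldl_insert (f := fun _ x => fB x)]
    simp
  have hkeysA : dA.keys = PySem.Set.update ([] : List String) op_codes := by
    rw [hdA, keys_lineLoop, hkeys0]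
  have hnodA : dA.keys.Nodup := by
    rw [hkeysA]; exact PySem.Set.nodup_ofList (α := String) op_codes
  have hnodB : dB.keys.Nodup := by
    rw [hkeysB]; exact PySem.Set.nodup_ofList (α := String) op_codes
  have hmem : ∀ k, k ∈ PySem.Set.update ([] : List String) op_codes ↔ k ∈ op_codes := by
    intro k; exact PySem.Set.mem_ofList (α := String) op_codes k
  have hitems : dA.items = dB.items := by
    rw [PySem.Dict.items_eq_map_keys dA hnodA [], PySem.Dict.items_eq_map_keys dB hnodB [],
        hkeysA, hkeysB]
    apply List.map_congr_left
    intro k hk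
    have hkmem : k ∈ op_codes := (hmem k).1 hk
    have hgB : dB.getD k [] = fB k := by
      rw [hdB, getD_foldl_insert_fun, if_pos hkmem]
    have hg0 : d0.getD k [] = [] := by
      rw [hd0, getD_foldl_insert_fun (f := fun _ => ([] : List Int))]
      split <;> simp
    have hc0 : d0.contains k = true := by
      rw [PySem.Dict.contains_iff_mem_keys, hkeys0]
      exact (hmem k).2 hkmem
    have hgA : dA.getD k [] =
        ((PySem.List.enumerate op_code_occurrence_list).filter
          (fun p => pvParseOp p.2 == k)).map (·.1) := by
      rw [hdA, getD_lineLoop, hg0, hc0]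
      simp
    rw [hgA, hgB, hfB]
    rw [enumerate_map]
    simp [List.filter_map, Function.comp_def]
  rw [hitems]

-- ===== VERDICT (by name: the statement is the Claim_ definition above) =====
theorem reduce_op_code_list_to_index_list_spec : Claim_equal_reduce_op_code_list_to_index_list := by
  intro l ops _
  unfold Spec_reduce_op_code_list_to_index_list
  exact reduce_spec_aux l ops
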